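-- pv_equiv track=rewrite | github.com/ecaracasdev/utn-sintaxsis-progrmacion | ejercicio3/tadAgenda.py | eliminarCitasPorObraSocial
-- ===== SOURCE A (Python) =====
-- def eliminarCitasPorObraSocial(agenda, obraSocial):
--     # newAgenda = []
--     # for cita in agenda:
--     #     if cita[1] != obraSocial:
--     #         newAgenda.append(cita)
--     # agenda = newAgenda.copy()
--     i=0
--     while i < len(agenda):
--         if agenda[i][0] == obraSocial:
--             agenda.remove(agenda[i])
--         else:
--             i+=1
--     return agenda
-- ===== SOURCE B (Python) =====
-- def eliminarCitasPorObraSocial(agenda, obraSocial):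
--     # In-place two-pointer compaction: overwrite survivors forward, then truncate.
--     w = 0
--     for r in range(len(agenda)):
--         if agenda[r][0] != obraSocial:
--             agenda[w] = agenda[r]
--             w += 1
--     del agenda[w:]
--     return agenda
-- ===== Notes on version B (the rewrite author's own statement) =====
-- stated objective: alternative
-- what changed: Replaced the search-and-remove while loop (list.remove rescans the list on every hit) with a single forward pass that compacts survivors in place with a write cursor and truncates once.
import Mathlib
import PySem

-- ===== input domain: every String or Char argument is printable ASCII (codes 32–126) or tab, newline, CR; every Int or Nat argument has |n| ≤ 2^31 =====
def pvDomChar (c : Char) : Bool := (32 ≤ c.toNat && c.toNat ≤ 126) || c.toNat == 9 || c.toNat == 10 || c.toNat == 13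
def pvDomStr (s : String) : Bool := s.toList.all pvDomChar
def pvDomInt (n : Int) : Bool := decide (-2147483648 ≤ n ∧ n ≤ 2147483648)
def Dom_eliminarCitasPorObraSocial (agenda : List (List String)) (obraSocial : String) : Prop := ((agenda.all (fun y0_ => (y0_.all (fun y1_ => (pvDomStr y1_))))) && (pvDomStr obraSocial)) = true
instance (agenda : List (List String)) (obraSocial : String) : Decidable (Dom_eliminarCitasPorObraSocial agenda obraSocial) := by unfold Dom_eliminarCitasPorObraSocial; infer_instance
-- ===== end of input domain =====

-- A removes matching appointments with a while/list.remove loop; B is an in-place two-pointer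
-- compaction (same returned value; both mutate the argument list in Python).


-- ===== PORT A =====
-- A's while loop: i starts at 0; while i < len(agenda): if agenda[i][0] == obraSocial,
-- agenda.remove(agenda[i]) (list shrinks, i stays), else i += 1.
-- 'none' cases of pyGet?/remove? are Python's IndexError (cita = []) resp. unreachable
-- (agenda[i] is always a member); Pre_ excludes the IndexError inputs.
def pvElimALoop (agenda : List (List String)) (obraSocial : String) (i : Nat) : List (List String) :=
  if h : i < agenda.length then
    let cita := agenda[i]
    match PySem.List.pyGet? cita 0 with
    | none => agenda              -- IndexError: cita[0] on an empty cita (outside Pre_)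
    | some c0 =>
      if c0 == obraSocial then
        match hr : PySem.List.remove? agenda cita with
        | some agenda' => pvElimALoop agenda' obraSocial i
        | none => agenda          -- unreachable: agenda[i] ∈ agenda
      else
        pvElimALoop agenda obraSocial (i + 1)
  else agenda
termination_by agenda.length - i
decreasing_by
  · have hm : agenda[i] ∈ agenda := List.getElem_mem h
    have := PySem.List.remove?_eq_some_erase agenda _ hm
    rw [hr] at this
    have hlen : agenda'.length = agenda.length - 1 := by
      cases this; exact List.length_erase_of_mem hm
    omega
  · omega

def eliminarCitasPorObraSocial (agenda : List (List String)) (obraSocial : String) : List (List String) :=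
  pvElimALoop agenda obraSocial 0

-- ===== PORT B =====
-- One step of B's loop body: state is (agenda, w); for index r read agenda[r],
-- compare agenda[r][0], and on a survivor write agenda[w] = agenda[r], w += 1.
def pvElimBStep (obraSocial : String) (st : List (List String) × Nat) (r : Int) : List (List String) × Nat :=
  let cita := PySem.List.pyGetD st.1 r []
  match PySem.List.pyGet? cita 0 with
  | none => st                    -- IndexError: cita[0] on an empty cita (outside Pre_)
  | some c0 =>
    if c0 != obraSocial then
      (PySem.List.pySetD st.1 (st.2 : Int) cita, st.2 + 1)
    else st

def eliminarCitasPorObraSocial_alt (agenda : List (List String)) (obraSocial : String) : List (List String) :=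
  let st := (PySem.List.pyRange 0 (PySem.List.len agenda) 1).foldl (pvElimBStep obraSocial) (agenda, 0)
  st.1.take st.2

-- ===== PRECONDITION & SPEC =====
-- Pre_ excludes exactly the inputs where some appointment is the empty list: there
-- A (and B) raise IndexError on cita[0].
def Pre_eliminarCitasPorObraSocial (agenda : List (List String)) (obraSocial : String) : Prop :=
  ∀ cita ∈ agenda, cita ≠ []
instance (agenda : List (List String)) (obraSocial : String) : Decidable (Pre_eliminarCitasPorObraSocial agenda obraSocial) := by unfold Pre_eliminarCitasPorObraSocial; infer_instance
def pvWitness_eliminarCitasPorObraSocial : List (List String) × String :=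
  ([["OSDE", "Ana"], ["PAMI", "Luis"], ["OSDE", "Eva"]], "OSDE")

def Spec_eliminarCitasPorObraSocial (agenda : List (List String)) (obraSocial : String) (out : List (List String)) : Prop := out = eliminarCitasPorObraSocial_alt agenda obraSocial
instance (agenda : List (List String)) (obraSocial : String) (out : List (List String)) : Decidable (Spec_eliminarCitasPorObraSocial agenda obraSocial out) := by unfold Spec_eliminarCitasPorObraSocial; infer_instance

-- ===== CLAIM (what is proved, stated in full; the proofs are below) =====
def Claim_equal_eliminarCitasPorObraSocial : Prop := ∀ (agenda : List (List String)) (obraSocial : String), Dom_eliminarCitasPorObraSocial agenda obraSocial → Pre_eliminarCitasPorObraSocial agenda obraSocial → Spec_eliminarCitasPorObraSocial agenda obraSocial (eliminarCitasPorObraSocial agenda obraSocial)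

-- ===== LEMMAS AND PROOFS =====
-- Both sides keep exactly the citas whose first field differs from obraSocial.
def pvKeep (obraSocial : String) (cita : List String) : Bool :=
  match cita.head? with
  | some c0 => c0 != obraSocial
  | none => true

theorem pvElimALoop_eq_filter (obraSocial : String) :
    ∀ (n : Nat) (agenda : List (List String)) (i : Nat),
      agenda.length - i ≤ n →
      (∀ cita ∈ agenda, cita ≠ []) →
      (∀ cita ∈ agenda.take i, pvKeep obraSocial cita = true) →
      pvElimALoop agenda obraSocial i =
        agenda.take i ++ (agenda.drop i).filter (pvKeep obraSocial) := by
  intro n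
  induction n with
  | zero =>
    intro agenda i hn _ _
    rw [pvElimALoop]
    have h : ¬ i < agenda.length := by omega
    have hle : agenda.length ≤ i := by omega
    rw [List.take_of_length_le hle, List.drop_of_length_le hle]
    simp [h]
  | succ n ih =>
    intro agenda i hn hne hkeep
    rw [pvElimALoop]
    by_cases h : i < agenda.length
    · simp only [h, dif_pos]
      have hm : agenda[i] ∈ agenda := List.getElem_mem h
      have hcne : agenda[i] ≠ [] := hne _ hm
      obtain ⟨cita, hv⟩ : ∃ c, agenda[i] = c := ⟨_, rfl⟩
      have hdrop : agenda.drop i = cita :: agenda.drop (i + 1) := by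
        rw [List.drop_eq_getElem_cons h, hv]
      rw [hv] at hm hcne
      obtain ⟨c0, rest, hc⟩ : ∃ c0 rest, cita = c0 :: rest := by
        cases hcc : cita with
        | nil => exact absurd hcc hcne
        | cons a l => exact ⟨a, l, rfl⟩
      have hget : PySem.List.pyGet? cita 0 = some c0 := by
        rw [PySem.List.pyGet?_zero, hc]; rfl
      rw [hv, hget]
      by_cases hco : c0 == obraSocial
      · simp only [hco, if_pos]
        have hrm := PySem.List.remove?_eq_some_erase agenda _ hm
        have hnotkeep : pvKeep obraSocial cita = false := by
          simp [pvKeep, hc, bne, hco]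
        -- cita is not among the first i elements (they all satisfy pvKeep)
        have hnotin : cita ∉ agenda.take i := by
          intro hmem
          have := hkeep _ hmem
          rw [hnotkeep] at this; exact Bool.false_ne_true this
        have herase : agenda.erase cita = agenda.take i ++ agenda.drop (i + 1) := by
          conv_lhs => rw [← List.take_append_drop i agenda]
          rw [List.erase_append_right _ hnotin, hdrop, List.erase_cons_head]
        have htklen : (agenda.take i).length = i := by
          rw [List.length_take]; omega
        have htake : (agenda.take i ++ agenda.drop (i + 1)).take i = agenda.take i :=
          List.take_left' htklen
        have hdrop' : (agenda.take i ++ agenda.drop (i + 1)).drop i = agenda.drop (i + 1) :=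
          List.drop_left' htklen
        split
        next agenda' heq =>
          rw [hrm] at heq
          injection heq with heq
          subst heq
          rw [herase]
          rw [ih (agenda.take i ++ agenda.drop (i + 1)) i
            (by rw [List.length_append, htklen, List.length_drop]; omega)
            (by intro c hc'; rcases List.mem_append.1 hc' with h' | h'
                · exact hne _ (List.mem_of_mem_take h')
                · exact hne _ (List.mem_of_mem_drop h'))
            (by rw [htake]; exact hkeep),
            htake, hdrop', hdrop, List.filter_cons_of_neg (by simp [hnotkeep])]
        next heq =>
          rw [hrm] at heq
          exact absurd heq (by simp)
      · simp only [hco, if_neg, Bool.false_eq_true, not_false_eq_true]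
        have hkeepc : pvKeep obraSocial cita = true := by
          simp [pvKeep, hc, bne, hco]
        have htake1 : agenda.take (i + 1) = agenda.take i ++ [cita] := by
          rw [List.take_succ_eq_append_getElem h, hv]
        rw [ih agenda (i + 1) (by omega) hne
            (by rw [htake1]; intro c hc'
                rcases List.mem_append.1 hc' with h' | h'
                · exact hkeep _ h'
                · rw [List.mem_singleton.1 h']; exact hkeepc),
          htake1, hdrop, List.filter_cons_of_pos hkeepc, List.append_assoc]
        simp
    · have hle : agenda.length ≤ i := by omega
      rw [List.take_of_length_le hle, List.drop_of_length_le hle]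
      simp [h]

theorem pvElimBLoop_inv (obraSocial : String) (agenda : List (List String))
    (hne : ∀ cita ∈ agenda, cita ≠ []) :
    ∀ r : Nat, r ≤ agenda.length →
      (PySem.List.pyRange 0 (r : Int) 1).foldl (pvElimBStep obraSocial) (agenda, 0) =
        (((agenda.take r).filter (pvKeep obraSocial)) ++
            agenda.drop ((agenda.take r).filter (pvKeep obraSocial)).length,
          ((agenda.take r).filter (pvKeep obraSocial)).length) := by
  intro r
  induction r with
  | zero => intro _; simp [PySem.List.pyRange]
  | succ r ih =>
    intro hr
    have hr' : r < agenda.length := by omega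
    have hcast : ((r + 1 : Nat) : Int) = (r : Int) + 1 := by push_cast; ring
    rw [hcast, PySem.List.pyRange_one_succ_right (by positivity), List.foldl_append,
      ih (by omega)]
    set F := (agenda.take r).filter (pvKeep obraSocial) with hF
    have hFlen : F.length ≤ r := by
      calc F.length ≤ (agenda.take r).length := List.length_filter_le _ _
        _ ≤ r := by rw [List.length_take]; omega
    have hAglen : (F ++ agenda.drop F.length).length = agenda.length := by
      rw [List.length_append, List.length_drop]; omega
    -- the element read at index r is the original agenda[r]
    have hread : PySem.List.pyGetD (F ++ agenda.drop F.length) (r : Int) [] = agenda[r] := by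
      rw [PySem.List.pyGetD_natCast]
      have hrlt : r < (F ++ agenda.drop F.length).length := by omega
      rw [List.getD_eq_getElem _ _ hrlt,
        List.getElem_append_right (by omega)]
      rw [List.getElem_drop]
      congr 1; omega
    have hcne : agenda[r] ≠ [] := hne _ (List.getElem_mem hr')
    obtain ⟨c0, rest, hc⟩ : ∃ c0 rest, agenda[r] = c0 :: rest := by
      cases hcc : agenda[r] with
      | nil => exact absurd hcc hcne
      | cons a l => exact ⟨a, l, rfl⟩
    have htake1 : agenda.take (r + 1) = agenda.take r ++ [agenda[r]] :=
      List.take_succ_eq_append_getElem hr'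
    simp only [List.foldl_cons, List.foldl_nil]
    rw [pvElimBStep]
    simp only [hread]
    have hget : PySem.List.pyGet? agenda[r] 0 = some c0 := by
      rw [PySem.List.pyGet?_zero, hc]; rfl
    rw [hget]
    by_cases hco : c0 == obraSocial
    · have hnk : pvKeep obraSocial agenda[r] = false := by
        simp [pvKeep, hc, bne, hco]
      have : (c0 != obraSocial) = false := by simp [bne, hco]
      simp only [this, Bool.false_eq_true, if_neg, not_false_eq_true]
      rw [htake1, List.filter_append, List.filter_cons_of_neg (by simp [hnk])]
      simp [hF]
    · have hk : pvKeep obraSocial agenda[r] = true := by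
        simp [pvKeep, hc, bne, hco]
      have hbne : (c0 != obraSocial) = true := by simp [bne, hco]
      simp only [hbne, if_pos]
      rw [PySem.List.pySetD_natCast]
      have hdropF : agenda.drop F.length = agenda[F.length] :: agenda.drop (F.length + 1) :=
        List.drop_eq_getElem_cons (by omega)
      have hset : (F ++ agenda.drop F.length).set F.length agenda[r] =
          (F ++ [agenda[r]]) ++ agenda.drop (F.length + 1) := by
        rw [List.set_append_right _ _ (le_refl _), Nat.sub_self, hdropF, List.set_cons_zero,
          List.append_assoc, List.singleton_append]
      rw [hset, htake1, List.filter_append, List.filter_cons_of_pos hk]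
      simp [hF]

theorem pvElimB_eq_filter (agenda : List (List String)) (obraSocial : String)
    (hne : ∀ cita ∈ agenda, cita ≠ []) :
    eliminarCitasPorObraSocial_alt agenda obraSocial = agenda.filter (pvKeep obraSocial) := by
  simp only [eliminarCitasPorObraSocial_alt]
  rw [show PySem.List.len agenda = (agenda.length : Int) from PySem.List.len_eq agenda,
    pvElimBLoop_inv obraSocial agenda hne agenda.length (le_refl _)]
  simp only [List.take_length]
  rw [List.take_append_of_le_length (le_refl _)]
  simp

-- ===== VERDICT (by name: the statement is the Claim_ definition above) =====
theorem eliminarCitasPorObraSocial_spec : Claim_equal_eliminarCitasPorObraSocial := by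
  intro agenda obraSocial _ hpre
  unfold Spec_eliminarCitasPorObraSocial
  rw [pvElimB_eq_filter agenda obraSocial hpre]
  unfold eliminarCitasPorObraSocial
  rw [pvElimALoop_eq_filter obraSocial agenda.length agenda 0 (by omega) hpre (by simp)]
  simp
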